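-- pv_equiv track=rewrite | github.com/globus/globus-cli | reference/_generate.py | _format_option
-- ===== SOURCE A (Python) =====
-- def _format_option(optstr):
--     opt = optstr.split()
--     optnames, optparams = [], []
--     for o in opt:
--         if not optparams:
--             # options like '--foo / --bar' or '--foo, --bar'
--             if o.startswith("-") or o == "/":
--                 optnames.append(o)
--                 continue
--         optparams.append(o)
--     optnames = "*" + " ".join(optnames) + "*"
--     optparams = " ".join([f"`{x}`" for x in optparams])
--     return f"{optnames}{' ' if optparams else ''}{optparams}::\n"
-- ===== SOURCE B (Python) =====
-- def _format_option(optstr):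
--     params = optstr.split()
--     names = []
--     while params and (params[0].startswith("-") or params[0] == "/"):
--         names.append(params.pop(0))
--     out = "*" + " ".join(names) + "*"
--     for p in params:
--         out += " `" + p + "`"
--     return out + "::\n"
-- ===== Notes on version B (the rewrite author's own statement) =====
-- stated objective: simpler
-- what changed: Replaces A's stateful for-loop (routing each token by the 'params still empty' flag) and its join/conditional-space formatting with a front-pop while-loop that splits the leading option tokens off the token list and then builds the output string directly, one space-plus-backtick-wrapped chunk per parameter.
import Mathlib
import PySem

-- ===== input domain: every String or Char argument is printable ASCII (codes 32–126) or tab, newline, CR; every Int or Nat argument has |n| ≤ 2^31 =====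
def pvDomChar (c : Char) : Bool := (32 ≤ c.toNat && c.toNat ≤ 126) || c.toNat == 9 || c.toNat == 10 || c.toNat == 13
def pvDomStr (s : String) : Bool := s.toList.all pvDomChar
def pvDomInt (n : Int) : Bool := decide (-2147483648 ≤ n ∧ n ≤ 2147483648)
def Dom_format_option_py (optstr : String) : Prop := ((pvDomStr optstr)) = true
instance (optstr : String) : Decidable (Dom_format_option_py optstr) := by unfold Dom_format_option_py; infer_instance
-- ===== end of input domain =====

-- B replaces A's stateful flag-loop and join/conditional-space formatting by a
-- destructive front-pop split of the token list followed by direct accumulation of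
-- the output string one backtick-wrapped chunk at a time; a simpler decomposition.


-- ===== PORT A =====
-- A's for-loop: state (optnames, optparams); a token goes to names only while params is
-- still empty and the token starts with '-' or equals '/'.
def fmtLoopA (opt : List String) (optnames optparams : List String) :
    List String × List String :=
  match opt with
  | [] => (optnames, optparams)
  | o :: rest =>
    if optparams.isEmpty && (PySem.Str.startswith o "-" || o == "/") then
      fmtLoopA rest (optnames ++ [o]) optparams
    else
      fmtLoopA rest optnames (optparams ++ [o])

def format_option_py (optstr : String) : String :=
  let opt := PySem.Str.split₀ optstr
  let np := fmtLoopA opt [] []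
  let optnames := "*" ++ PySem.Str.join " " np.1 ++ "*"
  let optparams := PySem.Str.join " " (np.2.map (fun x => "`" ++ x ++ "`"))
  optnames ++ (if optparams ≠ "" then " " else "") ++ optparams ++ "::\n"

-- ===== PORT B =====
-- Source B's while-loop: pop option-like tokens off the front of params into names.
def popNames (names params : List String) : List String × List String :=
  match params with
  | p :: rest =>
      if PySem.Str.startswith p "-" || p == "/" then popNames (names ++ [p]) rest
      else (names, p :: rest)
  | [] => (names, [])

def format_option_py_alt (optstr : String) : String :=
  let np := popNames [] (PySem.Str.split₀ optstr)
  let out := "*" ++ PySem.Str.join " " np.1 ++ "*"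
  let out := np.2.foldl (fun acc p => acc ++ " `" ++ p ++ "`") out
  out ++ "::\n"

-- ===== PRECONDITION & SPEC =====
def Spec_format_option_py (optstr : String) (out : String) : Prop := out = format_option_py_alt optstr
instance (optstr : String) (out : String) : Decidable (Spec_format_option_py optstr out) := by unfold Spec_format_option_py; infer_instance

-- ===== CLAIM =====
def Claim_equal_format_option_py : Prop := ∀ (optstr : String), Dom_format_option_py optstr → Spec_format_option_py optstr (format_option_py optstr)

-- ===== LEMMAS AND PROOFS =====

-- once optparams is nonempty, A's loop appends every remaining token to it
theorem fmtLoopA_nonempty (l : List String) (ns : List String) (p : String)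
    (ps : List String) : fmtLoopA l ns (p :: ps) = (ns, (p :: ps) ++ l) := by
  induction l generalizing ps with
  | nil => simp [fmtLoopA]
  | cons o rest ih => simp [fmtLoopA, ih]

-- with params still empty, A's loop is exactly B's front-pop split
theorem fmtLoopA_eq_popNames (l : List String) (ns : List String) :
    fmtLoopA l ns [] = popNames ns l := by
  induction l generalizing ns with
  | nil => simp [fmtLoopA, popNames]
  | cons o rest ih =>
      by_cases h : PySem.Chars.startswith o.toList ['-'] = true ∨ o = "/"
      · simp [fmtLoopA, popNames, h, ih]
      · simp [fmtLoopA, popNames, h, fmtLoopA_nonempty]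

-- a backtick-wrapped join is never empty (it starts with '`')
theorem join_backtick_cons (x : String) (l : List (List Char)) :
    ∃ t, PySem.Chars.join [' '] (('`' :: (x.toList ++ ['`'])) :: l) = '`' :: t := by
  cases l with
  | nil => exact ⟨x.toList ++ ['`'], PySem.Chars.join_singleton _ _⟩
  | cons b bs =>
      rw [PySem.Chars.join_cons_cons]
      exact ⟨(x.toList ++ ['`']) ++ [' '] ++ PySem.Chars.join [' '] (b :: bs), by simp⟩

-- the conditional-space + backtick-join tail equals B's per-token chunks, at Char level
theorem tail_chars (ps : List String) :
    (if (PySem.Chars.join [' '] (ps.map (fun x => '`' :: (x.toList ++ ['`'])))).isEmpty = false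
       then [' '] else []) ++
      PySem.Chars.join [' '] (ps.map (fun x => '`' :: (x.toList ++ ['`'])))
    = (ps.map (fun p => ' ' :: '`' :: (p.toList ++ ['`']))).flatten := by
  induction ps with
  | nil => simp [PySem.Chars.join_nil]
  | cons p rest ih =>
      cases rest with
      | nil => simp [PySem.Chars.join_singleton]
      | cons q rs =>
          obtain ⟨t, ht⟩ := join_backtick_cons q (rs.map (fun x => '`' :: (x.toList ++ ['`'])))
          simp only [List.map_cons] at ih ht ⊢
          simp only [PySem.Chars.join_cons_cons, ht] at ih ⊢
          simp at ih ⊢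
          simp [← ih]

-- B's accumulation fold, read off as Char lists
theorem fold_chunks (ps : List String) (acc : String) :
    (ps.foldl (fun acc p => acc ++ " `" ++ p ++ "`") acc).toList
      = acc.toList ++ (ps.map (fun p => ' ' :: '`' :: (p.toList ++ ['`']))).flatten := by
  induction ps generalizing acc with
  | nil => simp
  | cons p rest ih => simp [ih]

-- ===== VERDICT =====
theorem format_option_py_spec : Claim_equal_format_option_py := by
  intro optstr _
  unfold Spec_format_option_py format_option_py format_option_py_alt
  simp only [fmtLoopA_eq_popNames]
  apply String.toList_inj.mp
  simp [fold_chunks, PySem.Str.join, ← tail_chars]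
  simp [Function.comp_def]
  split_ifs <;> rfl
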